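-- pv_equiv track=rewrite | github.com/JonathanGun/Project-Euler | 076 - 100/Prob89.py | RomanEff
-- ===== SOURCE A (Python) =====
-- def RomanEff(num):
--     if num == 0:
--         return 0
--
--     if num % 10 in [1, 5]:
--         return 1 + RomanEff(num // 10)
--     if num % 10 in [2, 4, 6, 9]:
--         return 2 + RomanEff(num // 10)
--     if num % 10 in [3, 7]:
--         return 3 + RomanEff(num // 10)
--     if num % 10 in [8]:
--         return 4 + RomanEff(num // 10)
--     if num % 10 in [0]:
--         return RomanEff(num // 10)
-- ===== SOURCE B (Python) =====
-- def _digit_cost(d):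
--     if d in (1, 5):
--         return 1
--     if d in (2, 4, 6, 9):
--         return 2
--     if d in (3, 7):
--         return 3
--     if d == 8:
--         return 4
--     return 0
--
-- def RomanEff(num):
--     total = 0
--     while num > 0:
--         total += _digit_cost(num % 10)
--         num //= 10
--     return total
-- ===== Notes on version B (the rewrite author's own statement) =====
-- stated objective: simpler
-- what changed: Replaces the recursive if-chain over digits with an iterative while-loop accumulating a per-digit cost table; the loop's num > 0 guard makes B total where A recurses forever.
-- crash fix: On negative num A recurses until RecursionError (num // 10 never reaches 0), while B's while num > 0 loop returns 0 immediately. — e.g. on RomanEff(-3): A raises RecursionError, B returns 0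
import Mathlib
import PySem

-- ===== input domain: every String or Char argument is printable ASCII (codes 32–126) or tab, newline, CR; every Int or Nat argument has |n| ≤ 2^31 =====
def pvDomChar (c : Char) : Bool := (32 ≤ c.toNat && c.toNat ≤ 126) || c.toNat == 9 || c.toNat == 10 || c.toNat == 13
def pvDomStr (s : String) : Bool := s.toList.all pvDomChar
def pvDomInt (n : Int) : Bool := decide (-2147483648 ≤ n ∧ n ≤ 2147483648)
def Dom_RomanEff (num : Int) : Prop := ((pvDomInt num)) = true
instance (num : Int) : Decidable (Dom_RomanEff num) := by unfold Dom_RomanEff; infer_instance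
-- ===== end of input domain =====

-- B replaces A's recursive digit-by-digit if-chain by an iterative loop over the digits
-- accumulating a per-digit cost; same cost per digit, different decomposition (objective: simpler).

-- ===== PORT A =====
-- A recurses on num // 10; on negative num this never reaches 0 (Python: RecursionError),
-- so the port carries a fuel of num.toNat + 1, sufficient for every num ≥ 0 (= Pre_).
def RomanEffFuel : Nat → Int → Int
  | 0, _ => 0  -- fuel exhausted: only reachable for num < 0, outside Pre_RomanEff
  | f + 1, num =>
    if num = 0 then 0
    else if PySem.Int.mod num 10 = 1 ∨ PySem.Int.mod num 10 = 5 then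
      1 + RomanEffFuel f (PySem.Int.floordiv num 10)
    else if PySem.Int.mod num 10 = 2 ∨ PySem.Int.mod num 10 = 4 ∨ PySem.Int.mod num 10 = 6 ∨ PySem.Int.mod num 10 = 9 then
      2 + RomanEffFuel f (PySem.Int.floordiv num 10)
    else if PySem.Int.mod num 10 = 3 ∨ PySem.Int.mod num 10 = 7 then
      3 + RomanEffFuel f (PySem.Int.floordiv num 10)
    else if PySem.Int.mod num 10 = 8 then
      4 + RomanEffFuel f (PySem.Int.floordiv num 10)
    else if PySem.Int.mod num 10 = 0 then
      RomanEffFuel f (PySem.Int.floordiv num 10)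
    else 0  -- unreachable: num % 10 ∈ [0,9] in Python (positive divisor)

def RomanEff (num : Int) : Int := RomanEffFuel (num.toNat + 1) num

-- ===== PORT B =====
def digitCost (d : Int) : Int :=
  if d = 1 ∨ d = 5 then 1
  else if d = 2 ∨ d = 4 ∨ d = 6 ∨ d = 9 then 2
  else if d = 3 ∨ d = 7 then 3
  else if d = 8 then 4
  else 0

def altLoop (num total : Int) : Int :=
  if 0 < num then
    altLoop (PySem.Int.floordiv num 10) (total + digitCost (PySem.Int.mod num 10))
  else total
termination_by num.toNat
decreasing_by
  rw [PySem.Int.floordiv_eq_ediv_of_pos (by norm_num : (0:Int) < 10)]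
  omega

def RomanEff_alt (num : Int) : Int := altLoop num 0

-- ===== PRECONDITION & SPEC =====
-- Pre_ excludes negative num, on which Python A recurses forever (RecursionError).
def Pre_RomanEff (num : Int) : Prop := 0 ≤ num
instance (num : Int) : Decidable (Pre_RomanEff num) := by unfold Pre_RomanEff; infer_instance
def pvWitness_RomanEff : Int := (1989)

-- On negative num A raises RecursionError (num // 10 never reaches 0); B's `while num > 0` loop returns 0.
def Raises_RomanEff (num : Int) : Prop := num < 0
instance (num : Int) : Decidable (Raises_RomanEff num) := by unfold Raises_RomanEff; infer_instance
def pvRaiseWitness_RomanEff : Int := (-3)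
def pvRaiseWitnessOut_RomanEff : Int := 0

def Spec_RomanEff (num : Int) (out : Int) : Prop := out = RomanEff_alt num
instance (num : Int) (out : Int) : Decidable (Spec_RomanEff num out) := by unfold Spec_RomanEff; infer_instance

-- ===== CLAIM (what is proved, stated in full; the proofs are below) =====
def Claim_equal_RomanEff : Prop := ∀ (num : Int), Dom_RomanEff num → Pre_RomanEff num → Spec_RomanEff num (RomanEff num)
def Claim_raises_RomanEff : Prop := (∀ (num : Int), Dom_RomanEff num → Raises_RomanEff num → ¬ Pre_RomanEff num) ∧ (Dom_RomanEff (pvRaiseWitness_RomanEff) ∧ Raises_RomanEff (pvRaiseWitness_RomanEff) ∧ RomanEff_alt (pvRaiseWitness_RomanEff) = pvRaiseWitnessOut_RomanEff)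

-- ===== LEMMAS AND PROOFS =====
lemma altLoop_eq_fuel : ∀ (fuel : Nat) (num total : Int), 0 ≤ num → num.toNat < fuel →
    altLoop num total = total + RomanEffFuel fuel num := by
  intro fuel
  induction fuel with
  | zero => intro num total h hlt; omega
  | succ f ih =>
    intro num total h hlt
    rw [altLoop, RomanEffFuel]
    by_cases h0 : num = 0
    · simp [h0]
    · have hpos : 0 < num := by omega
      rw [PySem.Int.mod_eq_emod_of_pos (by norm_num : (0:Int) < 10),
          PySem.Int.floordiv_eq_ediv_of_pos (by norm_num : (0:Int) < 10)]
      have hnn : 0 ≤ num / 10 := Int.ediv_nonneg h (by norm_num)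
      have hdec : (num / 10).toNat < f := by omega
      rw [if_pos hpos, if_neg h0, ih _ _ hnn hdec]
      have hd : num % 10 = 0 ∨ num % 10 = 1 ∨ num % 10 = 2 ∨ num % 10 = 3 ∨ num % 10 = 4 ∨
          num % 10 = 5 ∨ num % 10 = 6 ∨ num % 10 = 7 ∨ num % 10 = 8 ∨ num % 10 = 9 := by omega
      unfold digitCost
      rcases hd with h|h|h|h|h|h|h|h|h|h <;> rw [h] <;> norm_num <;> ring

-- ===== VERDICT (by name: the statement is the Claim_ definition above) =====
theorem RomanEff_spec : Claim_equal_RomanEff := by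
  intro num _ hpre
  unfold Spec_RomanEff RomanEff RomanEff_alt
  rw [altLoop_eq_fuel (num.toNat + 1) num 0 hpre (by omega)]
  ring

@[simp] theorem RomanEff_raises : Claim_raises_RomanEff := by
  unfold Claim_raises_RomanEff
  refine ⟨fun num _ hr => by unfold Raises_RomanEff Pre_RomanEff at *; omega, by decide, by decide, ?_⟩
  rw [pvRaiseWitness_RomanEff, RomanEff_alt, altLoop]
  norm_num [pvRaiseWitnessOut_RomanEff]
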